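-- pv_equiv track=rewrite | github.com/DeepNandre/Atlasly-flow | scripts/stage0_5/enterprise_service.py | _validate_api_scopes
-- ===== SOURCE A (Python) =====
-- ALLOWED_API_SCOPES = {
--     "webhooks:read",
--     "webhooks:write",
--     "connectors:read",
--     "connectors:run",
--     "dashboard:read",
--     "tasks:read",
--     "tasks:write",
--     "audit:read",
-- }
--
-- class EnterpriseReadinessError(ValueError):
--     def __init__(self, status: int, code: str, message: str):
--         super().__init__(message)
--         self.status = status
--         self.code = code
--         self.message = message
--
-- def _validate_api_scopes(scopes: list[str]) -> list[str]:
--     if not scopes: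
--         raise EnterpriseReadinessError(422, "validation_error", "scopes must not be empty")
--     normalized = [str(v).strip() for v in scopes if str(v).strip()]
--     invalid = sorted(set(normalized) - ALLOWED_API_SCOPES)
--     if invalid:
--         raise EnterpriseReadinessError(
--             422,
--             "validation_error",
--             f"unsupported scope(s): {', '.join(invalid)}",
--         )
--     return sorted(set(normalized))
-- ===== SOURCE B (Python) =====
-- ALLOWED_API_SCOPES = {
--     "webhooks:read",
--     "webhooks:write",
--     "connectors:read",
--     "connectors:run",
--     "dashboard:read",
--     "tasks:read",
--     "tasks:write",
--     "audit:read",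
-- }
--
-- class EnterpriseReadinessError(ValueError):
--     def __init__(self, status: int, code: str, message: str):
--         super().__init__(message)
--         self.status = status
--         self.code = code
--         self.message = message
--
-- def _validate_api_scopes(scopes: list[str]) -> list[str]:
--     if not scopes:
--         raise EnterpriseReadinessError(422, "validation_error", "scopes must not be empty")
--     # sort the stripped entries first, then one adjacent-dedup scan: no sets anywhere,
--     # and both the result and the invalid list come out already sorted and unique.
--     result, bad = [], []
--     prev = None
--     for s in sorted(str(v).strip() for v in scopes):
--         if not s or s == prev:
--             continue
--         prev = s
--         if s in ALLOWED_API_SCOPES: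
--             result.append(s)
--         else:
--             bad.append(s)
--     if bad:
--         raise EnterpriseReadinessError(
--             422,
--             "validation_error",
--             f"unsupported scope(s): {', '.join(bad)}",
--         )
--     return result
-- ===== Notes on version B (the rewrite author's own statement) =====
-- stated objective: alternative
-- what changed: Replaces A's hash-set pipeline (build list, set difference, sorted(set)) by sorting the stripped entries once and doing a single adjacent-dedup scan that routes each new value to the result or invalid list, so no sets are used and both outputs come out already sorted.
import Mathlib
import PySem

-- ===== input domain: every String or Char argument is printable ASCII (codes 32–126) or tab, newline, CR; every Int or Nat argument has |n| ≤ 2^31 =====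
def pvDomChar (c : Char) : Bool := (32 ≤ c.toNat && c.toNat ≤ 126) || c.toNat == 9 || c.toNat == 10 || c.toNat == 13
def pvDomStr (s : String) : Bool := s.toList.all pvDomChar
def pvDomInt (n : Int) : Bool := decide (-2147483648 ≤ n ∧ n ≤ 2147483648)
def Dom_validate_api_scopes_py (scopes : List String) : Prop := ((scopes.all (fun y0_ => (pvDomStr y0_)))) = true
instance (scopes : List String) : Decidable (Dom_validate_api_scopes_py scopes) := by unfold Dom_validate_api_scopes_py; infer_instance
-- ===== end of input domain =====

-- B replaces A's set-based pipeline (set difference + sorted(set)) by sorting the stripped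
-- entries once and doing a single adjacent-dedup scan (alternative decomposition, no sets).
-- Equivalence is about the RETURN value; where the Python raises (outside Pre_) both ports return [].

-- ===== PORT A =====
def allowedApiScopes : List String :=
  ["webhooks:read", "webhooks:write", "connectors:read", "connectors:run",
   "dashboard:read", "tasks:read", "tasks:write", "audit:read"]

-- normalized = [str(v).strip() for v in scopes if str(v).strip()]
def normalizedScopes (scopes : List String) : List String :=
  (scopes.map (fun v => PySem.Str.strip v)).filter (fun s => s != "")

def validate_api_scopes_py (scopes : List String) : List String :=
  if scopes = [] then []  -- Python raises EnterpriseReadinessError here (excluded by Pre_)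
  else if PySem.List.sorted
            (PySem.Set.diff (PySem.Set.ofList (normalizedScopes scopes))
              (PySem.Set.ofList allowedApiScopes)) (fun x => x) false ≠ [] then
    []  -- Python raises EnterpriseReadinessError here (excluded by Pre_)
  else PySem.List.sorted (PySem.Set.ofList (normalizedScopes scopes)) (fun x => x) false

-- ===== PORT B =====
-- one iteration of B's scan over the sorted stripped entries:
-- state = (prev, result, bad); skip empties and repeats of prev, else route by membership
def pvStep (acc : Option String × List String × List String) (s : String) :
    Option String × List String × List String :=
  if s = "" ∨ acc.1 = some s then acc
  else if s ∈ allowedApiScopes then (some s, acc.2.1 ++ [s], acc.2.2)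
  else (some s, acc.2.1, acc.2.2 ++ [s])

def validate_api_scopes_py_alt (scopes : List String) : List String :=
  if scopes = [] then []  -- raises (excluded by Pre_)
  else
    let st := (PySem.List.sorted (scopes.map (fun v => PySem.Str.strip v)) (fun x => x) false).foldl
      pvStep (none, [], [])
    if st.2.2 ≠ [] then []  -- raises (excluded by Pre_)
    else st.2.1

-- ===== PRECONDITION & SPEC =====
-- Pre_ excludes exactly the inputs on which the Python A raises EnterpriseReadinessError:
-- the empty list, and lists containing an entry whose strip is non-empty and not an allowed scope.
def Pre_validate_api_scopes_py (scopes : List String) : Prop :=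
  scopes ≠ [] ∧
  ∀ v ∈ scopes, PySem.Str.strip v = "" ∨ PySem.Str.strip v ∈ allowedApiScopes
instance (scopes : List String) : Decidable (Pre_validate_api_scopes_py scopes) := by
  unfold Pre_validate_api_scopes_py; infer_instance

def pvWitness_validate_api_scopes_py : List String := ["  tasks:read ", "audit:read", ""]

def Spec_validate_api_scopes_py (scopes : List String) (out : List String) : Prop := out = validate_api_scopes_py_alt scopes
instance (scopes : List String) (out : List String) : Decidable (Spec_validate_api_scopes_py scopes out) := by unfold Spec_validate_api_scopes_py; infer_instance

-- ===== CLAIM (what is proved, stated in full; the proofs are below) =====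
def Claim_equal_validate_api_scopes_py : Prop := ∀ (scopes : List String), Dom_validate_api_scopes_py scopes → Pre_validate_api_scopes_py scopes → Spec_validate_api_scopes_py scopes (validate_api_scopes_py scopes)

-- ===== LEMMAS AND PROOFS =====

-- lower-bound relation carried by B's scan: prev (if any) is ≤ every remaining element
def pvLB (p : Option String) (y : String) : Prop :=
  match p with
  | none => True
  | some x => x ≤ y

-- recursive characterisation of the pair of lists B's fold accumulates
def pvDed (p : Option String) : List String → List String × List String
  | [] => ([], [])
  | s :: t =>
    if s = "" ∨ p = some s then pvDed p t
    else
      let r := pvDed (some s) t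
      if s ∈ allowedApiScopes then (s :: r.1, r.2) else (r.1, s :: r.2)

theorem pv_fold_eq : ∀ (ys : List String) (p : Option String) (res bad : List String),
    (ys.foldl pvStep (p, res, bad)).2 = (res ++ (pvDed p ys).1, bad ++ (pvDed p ys).2)
  | [], p, res, bad => by simp [pvDed]
  | s :: t, p, res, bad => by
    rw [List.foldl_cons]
    by_cases h : s = "" ∨ p = some s
    · rw [show pvStep (p, res, bad) s = (p, res, bad) from by simp [pvStep, h]]
      simp [pvDed, h, pv_fold_eq t p res bad]
    · by_cases ha : s ∈ allowedApiScopes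
      · rw [show pvStep (p, res, bad) s = (some s, res ++ [s], bad) from by
            simp [pvStep, h, ha]]
        simp [pvDed, h, ha, pv_fold_eq t (some s) (res ++ [s]) bad]
      · rw [show pvStep (p, res, bad) s = (some s, res, bad ++ [s]) from by
            simp [pvStep, h, ha]]
        simp [pvDed, h, ha, pv_fold_eq t (some s) res (bad ++ [s])]

-- under Pre_, every non-empty entry is allowed, so the bad list stays empty
theorem pvDed_bad_nil : ∀ (ys : List String) (p : Option String),
    (∀ y ∈ ys, y = "" ∨ y ∈ allowedApiScopes) → (pvDed p ys).2 = []
  | [], _, _ => rfl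
  | s :: t, p, hall => by
    have ht : ∀ y ∈ t, y = "" ∨ y ∈ allowedApiScopes := fun y hy => hall y (by simp [hy])
    by_cases h : s = "" ∨ p = some s
    · simp [pvDed, h, pvDed_bad_nil t p ht]
    · have hs : s ∈ allowedApiScopes := by
        rcases hall s (by simp) with h1 | h1
        · exact absurd (Or.inl h1) h
        · exact h1
      simp [pvDed, h, hs, pvDed_bad_nil t (some s) ht]

-- membership in the result of the scan, on a sorted list with prev a lower bound
theorem pvDed_mem : ∀ (ys : List String) (p : Option String),
    ys.Pairwise (· ≤ ·) → (∀ y ∈ ys, pvLB p y) →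
    (∀ y ∈ ys, y = "" ∨ y ∈ allowedApiScopes) →
    ∀ x, x ∈ (pvDed p ys).1 ↔ x ∈ ys ∧ x ≠ "" ∧ p ≠ some x
  | [], p, _, _, _ => by simp [pvDed]
  | s :: t, p, hsort, hlb, hall => by
    have hsort' := (List.pairwise_cons.mp hsort).2
    have hhd : ∀ y ∈ t, s ≤ y := (List.pairwise_cons.mp hsort).1
    have ht : ∀ y ∈ t, y = "" ∨ y ∈ allowedApiScopes := fun y hy => hall y (by simp [hy])
    intro x
    by_cases h : s = "" ∨ p = some s
    · have hlb' : ∀ y ∈ t, pvLB p y := fun y hy => hlb y (by simp [hy])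
      rw [show (pvDed p (s :: t)).1 = (pvDed p t).1 from by simp [pvDed, h]]
      rw [pvDed_mem t p hsort' hlb' ht x]
      constructor
      · rintro ⟨hx, hne, hnp⟩; exact ⟨by simp [hx], hne, hnp⟩
      · rintro ⟨hx, hne, hnp⟩
        rcases List.mem_cons.mp hx with rfl | hx
        · rcases h with h | h
          · exact absurd h hne
          · exact absurd h hnp
        · exact ⟨hx, hne, hnp⟩
    · push Not at h
      have hs : s ∈ allowedApiScopes := by
        rcases hall s (by simp) with h1 | h1
        · exact absurd h1 h.1
        · exact h1
      have hlb' : ∀ y ∈ t, pvLB (some s) y := fun y hy => hhd y hy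
      rw [show (pvDed p (s :: t)).1 = s :: (pvDed (some s) t).1 from by simp [pvDed, h, hs]]
      rw [List.mem_cons, pvDed_mem t (some s) hsort' hlb' ht x]
      constructor
      · rintro (rfl | ⟨hx, hne, hnp⟩)
        · exact ⟨by simp, h.1, h.2⟩
        · refine ⟨by simp [hx], hne, ?_⟩
          rintro rfl
          -- p = some x with x ∈ t: then x ≤ s (lower bound) and s ≤ x (sorted), so x = s
          have h1 : x ≤ s := hlb s (by simp)
          have h2 : s ≤ x := hhd x hx
          exact (hnp (congrArg some (le_antisymm h2 h1))).elim
      · rintro ⟨hx, hne, hnp⟩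
        rcases List.mem_cons.mp hx with rfl | hx
        · exact Or.inl rfl
        · by_cases hxs : x = s
          · exact Or.inl hxs
          · exact Or.inr ⟨hx, hne, fun hc => hxs (Option.some.inj hc).symm⟩

-- the scan's result is strictly increasing
theorem pvDed_pairwise : ∀ (ys : List String) (p : Option String),
    ys.Pairwise (· ≤ ·) → (∀ y ∈ ys, pvLB p y) →
    (∀ y ∈ ys, y = "" ∨ y ∈ allowedApiScopes) →
    (pvDed p ys).1.Pairwise (· < ·)
  | [], _, _, _, _ => by simp [pvDed]
  | s :: t, p, hsort, hlb, hall => by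
    have hsort' := (List.pairwise_cons.mp hsort).2
    have hhd : ∀ y ∈ t, s ≤ y := (List.pairwise_cons.mp hsort).1
    have ht : ∀ y ∈ t, y = "" ∨ y ∈ allowedApiScopes := fun y hy => hall y (by simp [hy])
    by_cases h : s = "" ∨ p = some s
    · have hlb' : ∀ y ∈ t, pvLB p y := fun y hy => hlb y (by simp [hy])
      simpa [pvDed, h] using pvDed_pairwise t p hsort' hlb' ht
    · push Not at h
      have hs : s ∈ allowedApiScopes := by
        rcases hall s (by simp) with h1 | h1
        · exact absurd h1 h.1
        · exact h1
      have hlb' : ∀ y ∈ t, pvLB (some s) y := fun y hy => hhd y hy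
      have ih := pvDed_pairwise t (some s) hsort' hlb' ht
      rw [show (pvDed p (s :: t)).1 = s :: (pvDed (some s) t).1 from by simp [pvDed, h, hs]]
      refine List.pairwise_cons.mpr ⟨?_, ih⟩
      intro y hy
      obtain ⟨h1, _, h3⟩ := (pvDed_mem t (some s) hsort' hlb' ht y).mp hy
      exact lt_of_le_of_ne (hhd y h1) (fun he => h3 (congrArg some he))

theorem pv_norm_allowed (scopes : List String)
    (hpre : ∀ v ∈ scopes, PySem.Str.strip v = "" ∨ PySem.Str.strip v ∈ allowedApiScopes) :
    ∀ s ∈ (scopes.map (fun v => PySem.Str.strip v)), s = "" ∨ s ∈ allowedApiScopes := by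
  intro s hs
  obtain ⟨v, hv, rfl⟩ := List.mem_map.mp hs
  rcases hpre v hv with h | h
  · exact Or.inl h
  · exact Or.inr (by simpa using h)

-- ===== VERDICT (by name: the statement is the Claim_ definition above) =====
theorem validate_api_scopes_py_spec : Claim_equal_validate_api_scopes_py := by
  intro scopes _ hpre
  obtain ⟨hne, hall0⟩ := hpre
  -- the sorted stripped entries B scans
  set ys := PySem.List.sorted (scopes.map (fun v => PySem.Str.strip v)) (fun x => x) false with hys
  have hmem_ys : ∀ y, y ∈ ys ↔ y ∈ scopes.map (fun v => PySem.Str.strip v) := fun y =>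
    PySem.List.mem_sorted _ _ _ _
  have hall : ∀ y ∈ ys, y = "" ∨ y ∈ allowedApiScopes := fun y hy =>
    pv_norm_allowed scopes hall0 y ((hmem_ys y).mp hy)
  have hsort : ys.Pairwise (· ≤ ·) := PySem.List.sorted_pairwise _ _
  have hlb : ∀ y ∈ ys, pvLB none y := fun _ _ => trivial
  -- B's value is the scan result, and the bad list is empty
  have hbadnil : (pvDed none ys).2 = [] := pvDed_bad_nil ys none hall
  have hBalt : validate_api_scopes_py_alt scopes = (pvDed none ys).1 := by
    unfold validate_api_scopes_py_alt
    rw [if_neg hne]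
    simp only [← hys, pv_fold_eq ys none [] [], List.nil_append, hbadnil]
    simp
  -- everything A keeps is allowed, so A's set difference is empty
  have hallowed : ∀ s ∈ normalizedScopes scopes, s ∈ allowedApiScopes := by
    intro s hs
    obtain ⟨hs1, hs2⟩ := List.mem_filter.mp hs
    rcases pv_norm_allowed scopes hall0 s hs1 with h | h
    · simp [h] at hs2
    · exact h
  have hdiff : PySem.Set.diff (PySem.Set.ofList (normalizedScopes scopes))
      (PySem.Set.ofList allowedApiScopes) = [] := by
    refine List.filter_eq_nil_iff.mpr ?_
    intro s hs
    have hmem : s ∈ normalizedScopes scopes := (PySem.Set.mem_ofList _ _).mp hs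
    have : s ∈ PySem.Set.ofList allowedApiScopes :=
      (PySem.Set.mem_ofList _ _).mpr (hallowed s hmem)
    simp [PySem.Set.contains, this]
  have hsd : PySem.List.sorted
      (PySem.Set.diff (PySem.Set.ofList (normalizedScopes scopes))
        (PySem.Set.ofList allowedApiScopes)) (fun x => x) false = [] := by
    rw [hdiff]; exact (PySem.List.sorted_eq_nil_iff _ _ _).mpr rfl
  -- the scan result is a strictly increasing rearrangement of set(normalized)
  have hpw : (pvDed none ys).1.Pairwise (· < ·) := pvDed_pairwise ys none hsort hlb hall
  have hmemR : ∀ x, x ∈ (pvDed none ys).1 ↔ x ∈ PySem.Set.ofList (normalizedScopes scopes) := by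
    intro x
    rw [pvDed_mem ys none hsort hlb hall x, PySem.Set.mem_ofList, hmem_ys x]
    unfold normalizedScopes
    simp [List.mem_filter, and_comm]
  have hperm : (pvDed none ys).1.Perm (PySem.Set.ofList (normalizedScopes scopes)) :=
    (List.perm_ext_iff_of_nodup (hpw.imp ne_of_lt) (PySem.Set.nodup_ofList _)).mpr hmemR
  have hA : PySem.List.sorted (PySem.Set.ofList (normalizedScopes scopes)) (fun x => x) false
      = (pvDed none ys).1 :=
    PySem.List.sorted_eq_of_perm_of_pairwise_lt _ _ _ hperm hpw
  unfold Spec_validate_api_scopes_py validate_api_scopes_py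
  rw [if_neg hne, if_neg (fun hc => hc hsd), hBalt, hA]
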